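-- pv_equiv track=rewrite | github.com/SibomanaEdouard/pythonCchallenges | first.py | max_spacing
-- ===== SOURCE A (Python) =====
-- from typing import List, Tuple
--
-- def max_spacing(n: int, m: int, intervals: List[Tuple[int, int]]) -> int:
--     intervals.sort()
--
--     def count_trees(distance: int) -> int:
--         count = 0
--         last_pos = float('-inf')
--         for start, end in intervals:
--             pos = max(start, last_pos + distance)
--             while pos <= end:
--                 count += 1
--                 last_pos = pos
--                 pos += distance
--         return count
--
--     left, right = 0, intervals[-1][1] - intervals[0][0]
--     while left < right:
--         mid = left + (right - left + 1) // 2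
--         if count_trees(mid) >= n:
--             left = mid
--         else:
--             right = mid - 1
--
--     return left
-- ===== SOURCE B (Python) =====
-- def max_spacing(n, m, intervals):
--     intervals.sort()
--     lo, hi = 0, intervals[-1][1] - intervals[0][0]
--     base = intervals[0][0]
--
--     def enough(d):
--         # True iff at least n trees fit with spacing d: closed-form count per
--         # interval (no per-tree stepping), early exit once n trees are placed.
--         total = 0
--         last = base - d
--         for s, e in intervals:
--             p = max(s, last + d)
--             if p <= e:
--                 k = (e - p) // d + 1
--                 total += k
--                 last = p + (k - 1) * d
--                 if total >= n:
--                     return True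
--         return total >= n
--
--     while lo < hi:
--         mid = (lo + hi + 1) // 2
--         if enough(mid):
--             lo = mid
--         else:
--             hi = mid - 1
--     return lo
-- ===== Notes on version B (the rewrite author's own statement) =====
-- stated objective: alternative
-- what changed: A's count_trees (per-tree inner while loop, -inf sentinel) is replaced by a boolean predicate enough(d) that places trees per interval in closed form ((end-p)//d + 1), tracks the last position sentinel-free via last = first_start - d, and exits early once n trees are placed, so the feasibility test is O(m) instead of O(m + trees); the binary search probes mid = (lo+hi+1)//2 directly. Empty interval lists, on which A raises IndexError at intervals[-1], are excluded by Pre_.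
import Mathlib
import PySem

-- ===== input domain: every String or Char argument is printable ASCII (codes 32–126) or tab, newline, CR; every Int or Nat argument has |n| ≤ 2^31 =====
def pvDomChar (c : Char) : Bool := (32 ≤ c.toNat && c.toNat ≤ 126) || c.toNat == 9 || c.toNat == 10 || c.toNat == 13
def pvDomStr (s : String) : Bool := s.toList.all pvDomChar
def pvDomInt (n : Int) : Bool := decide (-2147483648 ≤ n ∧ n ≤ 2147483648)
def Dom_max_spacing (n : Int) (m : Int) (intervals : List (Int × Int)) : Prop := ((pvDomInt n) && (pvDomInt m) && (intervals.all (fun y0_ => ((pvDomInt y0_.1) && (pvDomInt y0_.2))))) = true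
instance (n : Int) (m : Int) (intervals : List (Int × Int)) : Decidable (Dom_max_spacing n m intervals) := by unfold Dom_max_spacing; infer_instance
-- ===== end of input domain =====

-- B replaces A's per-tree inner while loop by a closed-form per-interval placement inside a
-- boolean predicate with early exit (sentinel-free last position) — objective: alternative.
-- Both Pythons sort `intervals` IN PLACE (same mutation); the equivalence is about the return value.

-- ===== PORT A =====
-- inner `while pos <= end` loop of count_trees; fuel = (end - pos + 1).toNat at the call site,
-- which bounds the iteration count exactly whenever distance ≥ 1 (the only distances A uses).
def pvInnerA (d e : Int) : Nat → Int → Int → Option Int → Int × Option Int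
  | fuel, pos, count, lastPos =>
    if pos ≤ e then
      match fuel with
      | 0 => (count, lastPos)
      | fuel + 1 => pvInnerA d e fuel (pos + d) (count + 1) (some pos)
    else (count, lastPos)

-- one iteration of count_trees' for loop; last_pos = float('-inf') is modelled by `none`: exact,
-- since -inf + d = -inf and max(start, -inf) = start, and last_pos is otherwise an int.
def pvStepA (d : Int) (st : Int × Option Int) (iv : Int × Int) : Int × Option Int :=
  let pos := match st.2 with
    | none => iv.1
    | some lp => max iv.1 (lp + d)
  pvInnerA d iv.2 (iv.2 - pos + 1).toNat pos st.1 st.2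

-- count_trees of A
def pvCountA (ivs : List (Int × Int)) (d : Int) : Int :=
  (ivs.foldl (pvStepA d) ((0 : Int), (none : Option Int))).1

-- the `while left < right` loop; fuel = right.toNat at the call site, which bounds the
-- iteration count exactly (the gap right - left strictly decreases each iteration).
def pvSearchA (nv : Int) (ivs : List (Int × Int)) : Nat → Int → Int → Int
  | fuel, left, right =>
    if left < right then
      match fuel with
      | 0 => left
      | fuel + 1 =>
        let mid := left + PySem.Int.floordiv (right - left + 1) 2
        if pvCountA ivs mid ≥ nv then pvSearchA nv ivs fuel mid right
        else pvSearchA nv ivs fuel left (mid - 1)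
    else left

def max_spacing (n : Int) (m : Int) (intervals : List (Int × Int)) : Int :=
  let ivs := PySem.List.sorted2 intervals (fun p => p.1) (fun p => p.2)
  let right := (PySem.List.pyGetD ivs (-1) (0, 0)).2 - (PySem.List.pyGetD ivs 0 (0, 0)).1
  pvSearchA n ivs right.toNat 0 right

-- ===== PORT B =====
-- enough(d) of B: recursion over the interval list, closed-form placement per interval,
-- early `return True` as soon as the running total reaches nv.
def pvEnough (nv d : Int) : List (Int × Int) → Int → Int → Bool
  | [], total, _ => decide (total ≥ nv)
  | iv :: rest, total, last =>
    let p := max iv.1 (last + d)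
    if p ≤ iv.2 then
      let k := PySem.Int.floordiv (iv.2 - p) d + 1
      if total + k ≥ nv then true
      else pvEnough nv d rest (total + k) (p + (k - 1) * d)
    else pvEnough nv d rest total last

-- B's `while lo < hi` binary search; fuel = hi.toNat at the call site bounds the iterations.
def pvLoopB (nv : Int) (ivs : List (Int × Int)) (base : Int) : Nat → Int → Int → Int
  | 0, lo, _ => lo
  | fuel + 1, lo, hi =>
    if lo < hi then
      let mid := PySem.Int.floordiv (lo + hi + 1) 2
      if pvEnough nv mid ivs 0 (base - mid) then pvLoopB nv ivs base fuel mid hi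
      else pvLoopB nv ivs base fuel lo (mid - 1)
    else lo

def max_spacing_alt (n : Int) (m : Int) (intervals : List (Int × Int)) : Int :=
  let ivs := PySem.List.sorted2 intervals (fun p => p.1) (fun p => p.2)
  let hi := (PySem.List.pyGetD ivs (-1) (0, 0)).2 - (PySem.List.pyGetD ivs 0 (0, 0)).1
  let base := (PySem.List.pyGetD ivs 0 (0, 0)).1
  pvLoopB n ivs base hi.toNat 0 hi

-- ===== PRECONDITION & SPEC =====
-- Pre_ excludes only the empty interval list, on which A raises IndexError at intervals[-1].
def Pre_max_spacing (n : Int) (m : Int) (intervals : List (Int × Int)) : Prop := intervals ≠ []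
instance (n : Int) (m : Int) (intervals : List (Int × Int)) : Decidable (Pre_max_spacing n m intervals) := by unfold Pre_max_spacing; infer_instance
def pvWitness_max_spacing : Int × Int × (List (Int × Int)) := (3, 1, [(0, 10)])

def Spec_max_spacing (n : Int) (m : Int) (intervals : List (Int × Int)) (out : Int) : Prop := out = max_spacing_alt n m intervals
instance (n : Int) (m : Int) (intervals : List (Int × Int)) (out : Int) : Decidable (Spec_max_spacing n m intervals out) := by unfold Spec_max_spacing; infer_instance

-- ===== CLAIM (what is proved, stated in full; the proofs are below) =====
def Claim_equal_max_spacing : Prop := ∀ (n : Int) (m : Int) (intervals : List (Int × Int)), Dom_max_spacing n m intervals → Pre_max_spacing n m intervals → Spec_max_spacing n m intervals (max_spacing n m intervals)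

-- ===== LEMMAS AND PROOFS =====

-- proof-only helper: the state transformer of one iteration of B's enough-loop
def pvStepB (d : Int) (st : Int × Int) (iv : Int × Int) : Int × Int :=
  let p := max iv.1 (st.2 + d)
  if p ≤ iv.2 then
    let k := PySem.Int.floordiv (iv.2 - p) d + 1
    (st.1 + k, p + (k - 1) * d)
  else st

-- the inner while loop exits immediately when pos > e, whatever the fuel
theorem pvInnerA_stop (d e : Int) (fuel : Nat) (pos count : Int) (lp : Option Int)
    (h : ¬ pos ≤ e) : pvInnerA d e fuel pos count lp = (count, lp) := by
  cases fuel <;> rw [pvInnerA, if_neg h]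

-- the inner while loop equals the closed form, whenever d ≥ 1, pos ≤ e and the fuel covers the span
theorem pvInnerA_closed (d e : Int) (hd : 1 ≤ d) :
    ∀ (fuel : Nat) (pos count : Int) (lastPos : Option Int), pos ≤ e → (e - pos).toNat < fuel →
      pvInnerA d e fuel pos count lastPos =
        (count + (PySem.Int.floordiv (e - pos) d + 1),
         some (pos + PySem.Int.floordiv (e - pos) d * d)) := by
  intro fuel
  induction fuel with
  | zero => intro pos count lastPos hpe hf; omega
  | succ f ih =>
    intro pos count lastPos hpe hf
    rw [pvInnerA, if_pos hpe]
    rw [PySem.Int.floordiv_eq_ediv_of_pos (by omega : (0:Int) < d)]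
    by_cases h2 : pos + d ≤ e
    · rw [ih (pos + d) (count + 1) (some pos) h2 (by omega)]
      rw [PySem.Int.floordiv_eq_ediv_of_pos (by omega : (0:Int) < d)]
      have hq : (e - pos) / d = (e - (pos + d)) / d + 1 := by
        have := Int.add_mul_ediv_right (e - (pos + d)) 1 (by omega : d ≠ 0)
        rw [show e - (pos + d) + 1 * d = e - pos by ring] at this
        omega
      simp only [Prod.mk.injEq, Option.some.injEq]
      exact ⟨by omega, by rw [hq]; ring⟩
    · have hq0 : (e - pos) / d = 0 := Int.ediv_eq_zero_of_lt (by omega) (by omega)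
      rw [pvInnerA_stop d e f (pos + d) (count + 1) (some pos) (by omega), hq0]
      simp only [Prod.mk.injEq, Option.some.injEq]
      exact ⟨by omega, by ring⟩

-- one-step unfolding equations (stated with `max` kept intact, so omega can use them)
theorem pvStepB_eq (d c l : Int) (iv : Int × Int) :
    pvStepB d (c, l) iv =
      if max iv.1 (l + d) ≤ iv.2 then
        (c + (PySem.Int.floordiv (iv.2 - max iv.1 (l + d)) d + 1),
         max iv.1 (l + d) + PySem.Int.floordiv (iv.2 - max iv.1 (l + d)) d * d)
      else (c, l) := by
  have h : pvStepB d (c, l) iv =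
      if max iv.1 (l + d) ≤ iv.2 then
        (c + (PySem.Int.floordiv (iv.2 - max iv.1 (l + d)) d + 1),
         max iv.1 (l + d) + (PySem.Int.floordiv (iv.2 - max iv.1 (l + d)) d + 1 - 1) * d)
      else (c, l) := rfl
  rw [h, add_sub_cancel_right]

theorem pvEnough_cons (nv d c l : Int) (iv : Int × Int) (t : List (Int × Int)) :
    pvEnough nv d (iv :: t) c l =
      if max iv.1 (l + d) ≤ iv.2 then
        (if c + (PySem.Int.floordiv (iv.2 - max iv.1 (l + d)) d + 1) ≥ nv then true
         else pvEnough nv d t (c + (PySem.Int.floordiv (iv.2 - max iv.1 (l + d)) d + 1))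
                (max iv.1 (l + d) + PySem.Int.floordiv (iv.2 - max iv.1 (l + d)) d * d))
      else pvEnough nv d t c l := by
  have h : pvEnough nv d (iv :: t) c l =
      if max iv.1 (l + d) ≤ iv.2 then
        (if c + (PySem.Int.floordiv (iv.2 - max iv.1 (l + d)) d + 1) ≥ nv then true
         else pvEnough nv d t (c + (PySem.Int.floordiv (iv.2 - max iv.1 (l + d)) d + 1))
                (max iv.1 (l + d) + (PySem.Int.floordiv (iv.2 - max iv.1 (l + d)) d + 1 - 1) * d))
      else pvEnough nv d t c l := rfl
  rw [h, add_sub_cancel_right]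

-- the running total of B's fold never decreases (each placed batch has k ≥ 1)
theorem pvFoldB_mono (d : Int) (hd : 1 ≤ d) :
    ∀ (rest : List (Int × Int)) (c l : Int), c ≤ (rest.foldl (pvStepB d) (c, l)).1 := by
  intro rest
  induction rest with
  | nil => intro c l; exact le_refl c
  | cons iv t ih =>
    intro c l
    rw [List.foldl_cons, pvStepB_eq]
    by_cases h : max iv.1 (l + d) ≤ iv.2
    · rw [if_pos h]
      have hk : 0 ≤ PySem.Int.floordiv (iv.2 - max iv.1 (l + d)) d := by
        rw [PySem.Int.floordiv_eq_ediv_of_pos (by omega : (0:Int) < d)]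
        exact Int.ediv_nonneg (by omega) (by omega)
      exact le_trans (by omega) (ih _ _)
    · rw [if_neg h]; exact ih c l

-- B's early-exit predicate decides exactly "final fold total ≥ nv"
theorem pvEnough_eq_fold (nv d : Int) (hd : 1 ≤ d) :
    ∀ (rest : List (Int × Int)) (c l : Int),
      pvEnough nv d rest c l = decide ((rest.foldl (pvStepB d) (c, l)).1 ≥ nv) := by
  intro rest
  induction rest with
  | nil => intro c l; rfl
  | cons iv t ih =>
    intro c l
    rw [pvEnough_cons, List.foldl_cons, pvStepB_eq]
    by_cases h : max iv.1 (l + d) ≤ iv.2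
    · rw [if_pos h, if_pos h]
      by_cases hge : c + (PySem.Int.floordiv (iv.2 - max iv.1 (l + d)) d + 1) ≥ nv
      · rw [if_pos hge]
        have hm := pvFoldB_mono d hd t
          (c + (PySem.Int.floordiv (iv.2 - max iv.1 (l + d)) d + 1))
          (max iv.1 (l + d) + PySem.Int.floordiv (iv.2 - max iv.1 (l + d)) d * d)
        symm
        rw [decide_eq_true_iff]
        omega
      · rw [if_neg hge]; exact ih _ _
    · rw [if_neg h, if_neg h]; exact ih c l

-- one step of A's loop from a `some` state equals one step of B's loop (the count and the
-- integer last position coincide, A merely wraps the latter in `some`)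
theorem pvStepA_some (d : Int) (hd : 1 ≤ d) (c l : Int) (iv : Int × Int) :
    pvStepA d (c, some l) iv = ((pvStepB d (c, l) iv).1, some (pvStepB d (c, l) iv).2) := by
  have hA : pvStepA d (c, some l) iv =
      pvInnerA d iv.2 (iv.2 - max iv.1 (l + d) + 1).toNat (max iv.1 (l + d)) c (some l) := rfl
  rw [hA, pvStepB_eq]
  by_cases hc : max iv.1 (l + d) ≤ iv.2
  · rw [pvInnerA_closed d iv.2 hd _ _ c (some l) hc (by omega), if_pos hc]
  · rw [pvInnerA_stop d iv.2 _ _ c (some l) hc, if_neg hc]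

-- one step of A's loop from the initial `none` state, when B's last satisfies last + d ≤ start
theorem pvStepA_none (d : Int) (hd : 1 ≤ d) (c lB : Int) (iv : Int × Int)
    (hle : lB + d ≤ iv.1) :
    pvStepA d (c, none) iv = ((pvStepB d (c, lB) iv).1, some (pvStepB d (c, lB) iv).2) ∨
      (pvStepA d (c, none) iv = (c, none) ∧ pvStepB d (c, lB) iv = (c, lB)) := by
  have hA : pvStepA d (c, (none : Option Int)) iv =
      pvInnerA d iv.2 (iv.2 - iv.1 + 1).toNat iv.1 c none := rfl
  have hmax : max iv.1 (lB + d) = iv.1 := by omega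
  rw [hA, pvStepB_eq, hmax]
  by_cases hc : iv.1 ≤ iv.2
  · left
    rw [pvInnerA_closed d iv.2 hd _ _ c none hc (by omega), if_pos hc]
  · right
    rw [pvInnerA_stop d iv.2 _ _ c none hc, if_neg hc]
    exact ⟨rfl, rfl⟩

-- A's fold (count, Option last) and B's fold (total, last) produce the same count, related by:
-- A's `some l` matches B's last = l, and A's initial `none` matches any B-last with l + d ≤ every
-- remaining start (B initialises last = base - d with base ≤ every start of the sorted list).
theorem pvFoldAB (d : Int) (hd : 1 ≤ d) :
    ∀ (rest : List (Int × Int)) (c lB : Int) (lA : Option Int),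
      (lA = some lB ∨ (lA = none ∧ ∀ iv ∈ rest, lB + d ≤ iv.1)) →
      (rest.foldl (pvStepA d) (c, lA)).1 = (rest.foldl (pvStepB d) (c, lB)).1 := by
  intro rest
  induction rest with
  | nil =>
    intro c lB lA _
    simp [List.foldl_nil]
  | cons iv t ih =>
    intro c lB lA hrel
    rw [List.foldl_cons, List.foldl_cons]
    rcases hrel with h | ⟨h1, h2⟩
    · subst h
      rw [pvStepA_some d hd c lB iv]
      exact ih _ _ _ (Or.inl rfl)
    · subst h1
      rcases pvStepA_none d hd c lB iv (h2 iv List.mem_cons_self) with h | ⟨hA, hB⟩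
      · rw [h]
        exact ih _ _ _ (Or.inl rfl)
      · rw [hA, hB]
        exact ih _ _ _ (Or.inr ⟨rfl, fun jv hm => h2 jv (List.mem_cons_of_mem iv hm)⟩)

-- the two binary searches agree for 0 ≤ lo, provided base is ≤ every interval start
theorem pvSearch_eq (nv base : Int) (ivs : List (Int × Int))
    (hbase : ∀ iv ∈ ivs, base ≤ iv.1) :
    ∀ (fuel : Nat) (lo hi : Int), 0 ≤ lo →
      pvSearchA nv ivs fuel lo hi = pvLoopB nv ivs base fuel lo hi := by
  intro fuel
  induction fuel with
  | zero =>
    intro lo hi _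
    rw [pvSearchA, pvLoopB]
    by_cases h : lo < hi <;> simp [h]
  | succ f ih =>
    intro lo hi hlo
    rw [pvSearchA, pvLoopB]
    by_cases h : lo < hi
    · rw [if_pos h, if_pos h]
      have hdpos : (0:Int) < 2 := by omega
      have hmid : lo + PySem.Int.floordiv (hi - lo + 1) 2 = PySem.Int.floordiv (lo + hi + 1) 2 := by
        rw [PySem.Int.floordiv_eq_ediv_of_pos hdpos, PySem.Int.floordiv_eq_ediv_of_pos hdpos]
        have := Int.add_mul_ediv_right (hi - lo + 1) lo (by omega : (2:Int) ≠ 0)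
        rw [show hi - lo + 1 + lo * 2 = lo + hi + 1 by ring] at this
        omega
      have hge1 : 1 ≤ PySem.Int.floordiv (hi - lo + 1) 2 := by
        rw [PySem.Int.le_floordiv_iff_mul_le hdpos]; omega
      dsimp only
      set mid := lo + PySem.Int.floordiv (hi - lo + 1) 2 with hmiddef
      have hcond : pvEnough nv (PySem.Int.floordiv (lo + hi + 1) 2) ivs 0
          (base - PySem.Int.floordiv (lo + hi + 1) 2) = decide (pvCountA ivs mid ≥ nv) := by
        rw [← hmid, pvEnough_eq_fold nv mid (by omega)]
        congr 1
        have : (ivs.foldl (pvStepA mid) ((0:Int), (none : Option Int))).1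
            = (ivs.foldl (pvStepB mid) ((0:Int), base - mid)).1 := by
          apply pvFoldAB mid (by omega)
          right
          exact ⟨rfl, fun iv hm => by have := hbase iv hm; omega⟩
        unfold pvCountA
        rw [this]
      rw [hcond]
      by_cases hc : pvCountA ivs mid ≥ nv
      · rw [if_pos hc, if_pos (by simp [hc]), ← hmid]
        exact ih _ _ (by omega)
      · rw [if_neg hc, if_neg (by simp [hc]), ← hmid]
        exact ih _ _ hlo
    · rw [if_neg h, if_neg h]

-- the `before` comparator sorted2 uses for pairs with keys fst, snd
def pvLt (a b : Int × Int) : Bool :=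
  decide (a.1 < b.1) || (!decide (b.1 < a.1) && decide (a.2 < b.2))

theorem pvLt_true {a b : Int × Int} (h : pvLt a b = true) : a.1 ≤ b.1 := by
  unfold pvLt at h
  simp only [Bool.or_eq_true, Bool.and_eq_true, Bool.not_eq_true', decide_eq_true_iff,
    decide_eq_false_iff_not] at h
  omega

theorem pvLt_false {a b : Int × Int} (h : pvLt a b = false) : b.1 ≤ a.1 := by
  unfold pvLt at h
  simp only [Bool.or_eq_false_iff, Bool.and_eq_false_iff, Bool.not_eq_false', decide_eq_true_iff,
    decide_eq_false_iff_not] at h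
  omega

-- insertion keeps the first components weakly sorted
theorem pvInsertBy_pw (x : Int × Int) :
    ∀ (ys : List (Int × Int)), ys.Pairwise (fun a b => a.1 ≤ b.1) →
      (PySem.List.insertBy pvLt x ys).Pairwise (fun a b => a.1 ≤ b.1) := by
  intro ys
  induction ys with
  | nil => intro _; simp [PySem.List.insertBy]
  | cons y t ih =>
    intro h
    rw [List.pairwise_cons] at h
    rw [PySem.List.insertBy]
    by_cases hb : pvLt x y = true
    · rw [if_pos hb]
      rw [List.pairwise_cons]
      constructor
      · intro z hz
        rcases List.mem_cons.mp hz with h1 | h2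
        · rw [h1]; exact pvLt_true hb
        · exact le_trans (pvLt_true hb) (h.1 z h2)
      · rw [List.pairwise_cons]; exact h
    · rw [if_neg hb]
      rw [List.pairwise_cons]
      constructor
      · intro z hz
        rcases (PySem.List.mem_insertBy pvLt x z t).mp hz with h1 | h2
        · rw [h1]; exact pvLt_false (by simpa using hb)
        · exact h.1 z h2
      · exact ih h.2

-- the sorted list is weakly sorted on first components
theorem pvSorted2_pw (xs : List (Int × Int)) :
    (PySem.List.sorted2 xs (fun p => p.1) (fun p => p.2)).Pairwise (fun a b => a.1 ≤ b.1) := by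
  have hrep : PySem.List.sorted2 xs (fun p => p.1) (fun p => p.2)
      = xs.foldl (fun acc x => PySem.List.insertBy pvLt x acc) [] := rfl
  rw [hrep]
  have : ∀ (xs : List (Int × Int)) (acc : List (Int × Int)),
      acc.Pairwise (fun a b => a.1 ≤ b.1) →
      (xs.foldl (fun acc x => PySem.List.insertBy pvLt x acc) acc).Pairwise
        (fun a b => a.1 ≤ b.1) := by
    intro xs
    induction xs with
    | nil => intro acc h; exact h
    | cons x t ih => intro acc h; exact ih _ (pvInsertBy_pw x acc h)
  exact this xs [] List.Pairwise.nil

-- ===== VERDICT (by name: the statement is the Claim_ definition above) =====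
theorem max_spacing_spec : Claim_equal_max_spacing := by
  intro n m intervals _ hpre
  unfold Spec_max_spacing max_spacing max_spacing_alt
  dsimp only
  have hne : PySem.List.sorted2 intervals (fun p => p.1) (fun p => p.2) ≠ [] := by
    intro h
    have hp := PySem.List.sorted2_perm intervals (fun p => p.1) (fun p => p.2) false
    rw [h] at hp
    exact hpre (List.Perm.eq_nil hp.symm)
  obtain ⟨v, t, hvt⟩ := List.exists_cons_of_ne_nil hne
  rw [hvt]
  have hbase : ∀ iv ∈ v :: t, (PySem.List.pyGetD (v :: t) 0 (0, 0)).1 ≤ iv.1 := by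
    have hpw := pvSorted2_pw intervals
    rw [hvt, List.pairwise_cons] at hpw
    have hget : PySem.List.pyGetD (v :: t) 0 ((0:Int), (0:Int)) = v := by
      simp [PySem.List.pyGetD, PySem.List.pyGet?, PySem.List.pyIdx?]
    rw [hget]
    intro iv hm
    rcases List.mem_cons.mp hm with h1 | h2
    · rw [h1]
    · exact hpw.1 iv h2
  exact pvSearch_eq n _ (v :: t) hbase _ 0 _ (by omega)
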